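-- pv_equiv track=rewrite | github.com/044creator/- | LAB4.py | seach_in_col
-- ===== SOURCE A (Python) =====
-- def seach_in_col(a):
--     col = []
--     for i in range(len(a)):
--         counter = 0
--         for j in range(len(a)):
--             if a[j][i] < 0:
--                 counter += 1
--         col.append(counter)
--     return col
-- ===== SOURCE B (Python) =====
-- def seach_in_col(a):
--     n = len(a)
--     col = [0] * n
--     for j in range(n):
--         row = a[j]
--         col = [c + (1 if row[i] < 0 else 0) for i, c in enumerate(col)]
--     return col
-- ===== Notes on version B (the rewrite author's own statement) =====
-- stated objective: alternative
-- what changed: B scans the matrix row-major with a running per-column accumulator list (rebuilt per row), instead of A's column-major double loop that finishes each column before the next.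
import Mathlib
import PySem

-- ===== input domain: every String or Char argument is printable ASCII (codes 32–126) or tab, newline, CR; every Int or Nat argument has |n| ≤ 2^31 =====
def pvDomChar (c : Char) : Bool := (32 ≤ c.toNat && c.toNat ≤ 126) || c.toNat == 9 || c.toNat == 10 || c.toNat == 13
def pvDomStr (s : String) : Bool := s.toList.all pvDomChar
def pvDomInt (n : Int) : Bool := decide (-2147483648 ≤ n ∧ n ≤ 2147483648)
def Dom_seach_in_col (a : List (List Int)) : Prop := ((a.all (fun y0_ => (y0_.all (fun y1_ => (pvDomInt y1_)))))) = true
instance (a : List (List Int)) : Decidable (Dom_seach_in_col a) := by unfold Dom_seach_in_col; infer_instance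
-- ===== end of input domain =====

-- B rebuilds a running per-column accumulator row by row (row-major) instead of A's
-- column-major double loop; objective: alternative decomposition, same cost.

-- ===== PORT A =====
-- a[j][i] as in Python: pyGet? on the row obtained by pyGet? on a; none (IndexError) excluded by Pre_.
def pvCell (a : List (List Int)) (j i : Nat) : Int :=
  ((PySem.List.pyGet? ((PySem.List.pyGet? a (Int.ofNat j)).getD []) (Int.ofNat i)).getD 0)

def seach_in_col (a : List (List Int)) : List Int :=
  (List.range a.length).foldl
    (fun col i =>
      col ++ [ (List.range a.length).foldl
                 (fun counter j => if pvCell a j i < 0 then counter + 1 else counter) (0 : Int) ])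
    []

-- ===== PORT B =====
def seach_in_col_alt (a : List (List Int)) : List Int :=
  (List.range a.length).foldl
    (fun col j =>
      let row := (PySem.List.pyGet? a (Int.ofNat j)).getD []
      col.mapIdx (fun i c => c + (if ((PySem.List.pyGet? row (Int.ofNat i)).getD 0) < 0 then 1 else 0)))
    (List.replicate a.length (0 : Int))

-- ===== PRECONDITION & SPEC =====
-- Pre_ excludes exactly the inputs where A raises IndexError: a row shorter than len(a).
def Pre_seach_in_col (a : List (List Int)) : Prop := ∀ row ∈ a, a.length ≤ row.length
instance (a : List (List Int)) : Decidable (Pre_seach_in_col a) := by unfold Pre_seach_in_col; infer_instance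
def pvWitness_seach_in_col : List (List Int) := [[1, -2], [-3, 4]]

def Spec_seach_in_col (a : List (List Int)) (out : List Int) : Prop := out = seach_in_col_alt a
instance (a : List (List Int)) (out : List Int) : Decidable (Spec_seach_in_col a out) := by unfold Spec_seach_in_col; infer_instance

-- ===== CLAIM (what is proved, stated in full; the proofs are below) =====
def Claim_equal_seach_in_col : Prop := ∀ (a : List (List Int)), Dom_seach_in_col a → Pre_seach_in_col a → Spec_seach_in_col a (seach_in_col a)

-- ===== LEMMAS AND PROOFS =====

-- A's outer append-fold is a map
theorem pv_foldl_append {α β : Type} (f : α → β) :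
    ∀ (L : List α) (acc : List β),
      L.foldl (fun col i => col ++ [f i]) acc = acc ++ L.map f := by
  intro L
  induction L with
  | nil => intro acc; simp
  | cons x xs ih => intro acc; simp [List.foldl, ih]

-- A's counter fold is a sum of indicators
theorem pv_foldl_count {α : Type} (p : α → Prop) [DecidablePred p] :
    ∀ (L : List α) (c : Int),
      L.foldl (fun counter j => if p j then counter + 1 else counter) c
        = c + (L.map (fun j => if p j then (1 : Int) else 0)).sum := by
  intro L
  induction L with
  | nil => intro c; simp
  | cons x xs ih =>
    intro c
    by_cases h : p x <;> simp [List.foldl, h, ih] <;> ring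

-- B's fold over rows accumulates pointwise sums
theorem pv_foldl_mapIdx (g : Nat → Nat → Int) :
    ∀ (L : List Nat) (col : List Int),
      L.foldl (fun col j => col.mapIdx (fun i c => c + g j i)) col
        = col.mapIdx (fun i c => c + (L.map (fun j => g j i)).sum) := by
  intro L
  induction L with
  | nil =>
    intro col
    apply List.ext_getElem
    · simp
    · intro i h1 h2
      simp [List.getElem_mapIdx]
  | cons x xs ih =>
    intro col
    simp only [List.foldl, ih]
    apply List.ext_getElem
    · simp
    · intro i h1 h2
      simp only [List.getElem_mapIdx, List.map_cons, List.sum_cons]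
      ring

theorem seach_in_col_eq (a : List (List Int)) :
    seach_in_col a = seach_in_col_alt a := by
  unfold seach_in_col seach_in_col_alt
  rw [pv_foldl_append
        (f := fun i => (List.range a.length).foldl
          (fun counter j => if pvCell a j i < 0 then counter + 1 else counter) (0 : Int))]
  rw [pv_foldl_mapIdx (g := fun j i =>
        if ((PySem.List.pyGet? ((PySem.List.pyGet? a (Int.ofNat j)).getD []) (Int.ofNat i)).getD 0) < 0
        then (1 : Int) else 0)]
  apply List.ext_getElem
  · simp
  · intro i h1 h2
    simp only [List.nil_append, List.getElem_map, List.getElem_range, List.getElem_mapIdx,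
      List.getElem_replicate]
    rw [pv_foldl_count]
    simp [pvCell]

-- ===== VERDICT (by name: the statement is the Claim_ definition above) =====
theorem seach_in_col_spec : Claim_equal_seach_in_col := by
  intro a _ _
  exact seach_in_col_eq a
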